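-- pv_equiv track=rewrite | github.com/Jawad12256/MorseMaster | textValidator.py | fixAdjacentRepeatedWordBreaks
-- ===== SOURCE A (Python) =====
-- def fixAdjacentRepeatedWordBreaks(text): #point A3.4
--     try:
--         left = 0
--         right = len(text)-1
--         while text[left] == '/':
--             left += 1
--         while text[right] == '/':
--             right -= 1
--         text = text[left:right+1]
--         newText = ''
--         characters = [char for char in text]
--         charPointer = 0
--         while charPointer < len(characters)-1:
--             if not(characters[charPointer] == '/' and characters[charPointer+1] == '/'):
--                 newText += characters[charPointer]
--             charPointer += 1
--         newText += characters[-1]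
--         return newText
--     except:
--         return False
-- ===== SOURCE B (Python) =====
-- def fixAdjacentRepeatedWordBreaks(text):
--     out = []
--     for ch in text:
--         if ch == '/' and (not out or out[-1] == '/'):
--             continue
--         out.append(ch)
--     if out and out[-1] == '/':
--         out.pop()
--     return ''.join(out) if out else False
-- ===== Notes on version B (the rewrite author's own statement) =====
-- stated objective: simpler
-- what changed: Replaced A's two index-walking strip loops plus a pairwise-lookahead collapse with repeated string concatenation (quadratic in the worst case) by a single left-to-right fold onto a list that skips a '/' when the output is empty or already ends in '/', then drops one trailing '/' and returns False on an empty result.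
-- outside the precondition, e.g. on fixAdjacentRepeatedWordBreaks(''): A returns False, B returns False; on fixAdjacentRepeatedWordBreaks('/'): A returns False, B returns False; on fixAdjacentRepeatedWordBreaks('///'): A returns False, B returns False
import Mathlib
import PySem

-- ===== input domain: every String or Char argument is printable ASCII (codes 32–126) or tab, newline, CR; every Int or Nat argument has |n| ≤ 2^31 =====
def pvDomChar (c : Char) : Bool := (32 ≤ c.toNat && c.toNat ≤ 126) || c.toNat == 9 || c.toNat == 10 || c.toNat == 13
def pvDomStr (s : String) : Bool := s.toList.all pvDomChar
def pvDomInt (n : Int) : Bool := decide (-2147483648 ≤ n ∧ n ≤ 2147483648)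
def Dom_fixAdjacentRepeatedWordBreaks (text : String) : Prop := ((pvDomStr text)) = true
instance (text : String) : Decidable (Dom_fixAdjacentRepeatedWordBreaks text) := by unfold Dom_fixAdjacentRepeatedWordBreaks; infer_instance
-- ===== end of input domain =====

-- B replaces A's two strip pointer loops plus pairwise-lookahead collapse by ONE left-to-right fold
-- (skip a '/' when the output is empty or already ends in '/', then drop a single trailing '/'); same cost, simpler.
-- Python A returns False (ported as `none`) when the text is empty or all slashes; B returns False there too.

-- ===== PORT A =====
/-- `while text[left] == '/': left += 1`: walk `left` past leading slashes; `none` is the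
IndexError when `left` runs past the end (empty or all-slash text), caught by A's `except` → `False`. -/
def pvAStripLeft : List Char → Option (List Char)
  | [] => none
  | c :: r => if c = '/' then pvAStripLeft r else some (c :: r)

/-- `while text[right] == '/': right -= 1`: applied to the reversed tail, this walks `right`
down past trailing slashes (it can only run after the first loop found a non-slash char). -/
def pvAStripRightRev : List Char → List Char
  | [] => []
  | c :: r => if c = '/' then pvAStripRightRev r else c :: r

/-- The `while charPointer < len(characters)-1` loop (emit `characters[charPointer]` unless it and
its successor are both `'/'`) followed by the final `newText += characters[-1]`. -/
def pvACollapse : List Char → List Char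
  | [] => []
  | [c] => [c]
  | c₁ :: c₂ :: r => (if c₁ = '/' ∧ c₂ = '/' then [] else [c₁]) ++ pvACollapse (c₂ :: r)

def fixAdjacentRepeatedWordBreaks (text : String) : Option String :=
  match pvAStripLeft text.toList with
  | none => none                                   -- IndexError in a strip loop → except → False
  | some cs =>
    -- `text = text[left:right+1]`: the kept middle slice
    let cs2 := (pvAStripRightRev cs.reverse).reverse
    match cs2 with
    | [] => none                                   -- `characters[-1]` would raise (unreachable here)
    | c :: r => some (String.ofList (pvACollapse (c :: r)))

-- ===== PORT B =====
/-- Body of B's `for ch in text` loop: skip `ch == '/'` when `out` is empty or ends in `'/'`,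
else `out.append(ch)`. -/
def pvBStep (out : List Char) (ch : Char) : List Char :=
  if ch = '/' ∧ (out = [] ∨ out.getLast? = some '/') then out else out ++ [ch]

def fixAdjacentRepeatedWordBreaks_alt (text : String) : Option String :=
  let out := text.toList.foldl pvBStep []
  -- `if out and out[-1] == '/': out.pop()`
  let out := if out.getLast? = some '/' then out.dropLast else out
  -- `return ''.join(out) if out else False`
  if out = [] then none else some (String.ofList out)

-- ===== PRECONDITION & SPEC =====
-- Pre_ excludes exactly the empty and all-slash texts, on which A's except-clause returns the
-- bool False — a value outside the declared return type Optional[str] (B returns False there too).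
def Pre_fixAdjacentRepeatedWordBreaks (text : String) : Prop :=
  text.toList.any (fun c => decide (c ≠ '/')) = true
instance (text : String) : Decidable (Pre_fixAdjacentRepeatedWordBreaks text) := by
  unfold Pre_fixAdjacentRepeatedWordBreaks; infer_instance
def pvWitness_fixAdjacentRepeatedWordBreaks : String := "a//b/"

def Spec_fixAdjacentRepeatedWordBreaks (text : String) (out : Option String) : Prop := out = fixAdjacentRepeatedWordBreaks_alt text
instance (text : String) (out : Option String) : Decidable (Spec_fixAdjacentRepeatedWordBreaks text out) := by unfold Spec_fixAdjacentRepeatedWordBreaks; infer_instance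

-- ===== CLAIM (what is proved, stated in full; the proofs are below) =====
def Claim_equal_fixAdjacentRepeatedWordBreaks : Prop := ∀ (text : String), Dom_fixAdjacentRepeatedWordBreaks text → Pre_fixAdjacentRepeatedWordBreaks text → Spec_fixAdjacentRepeatedWordBreaks text (fixAdjacentRepeatedWordBreaks text)

-- ===== LEMMAS AND PROOFS =====

/-- State machine describing B's emitted tail: `true` = the last emitted char was `'/'`. -/
def pvRun : Bool → List Char → List Char
  | _, [] => []
  | b, c :: r => if c = '/' then (if b then pvRun true r else '/' :: pvRun true r) else c :: pvRun false r

/-- B's trailing-slash fix as a function. -/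
def pvFix (l : List Char) : List Char := if l.getLast? = some '/' then l.dropLast else l

/-- A's right strip on a list in normal order. -/
def pvRstrip (l : List Char) : List Char := (pvAStripRightRev l.reverse).reverse

lemma pvAStripRightRev_eq_dropWhile (l : List Char) :
    pvAStripRightRev l = l.dropWhile (fun c => c = '/') := by
  induction l with
  | nil => rfl
  | cons c r ih => by_cases hc : c = '/' <;> simp [pvAStripRightRev, List.dropWhile, hc, ih]

lemma pvRstrip_cons (c : Char) (t : List Char) :
    pvRstrip (c :: t) =
      if ∀ x ∈ t, x = '/' then (if c = '/' then [] else [c]) else c :: pvRstrip t := by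
  unfold pvRstrip
  rw [List.reverse_cons, pvAStripRightRev_eq_dropWhile, pvAStripRightRev_eq_dropWhile,
    List.dropWhile_append]
  by_cases h : ∀ x ∈ t, x = '/'
  · have he : t.reverse.dropWhile (fun c => decide (c = '/')) = [] := by
      rw [List.dropWhile_eq_nil_iff]; intro x hx; simpa using h x (List.mem_reverse.mp hx)
    rw [if_pos h]
    simp [he, List.dropWhile]
    by_cases hc : c = '/' <;> simp [hc]
  · have hne : t.reverse.dropWhile (fun c => decide (c = '/')) ≠ [] := by
      rw [Ne, List.dropWhile_eq_nil_iff]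
      intro hall
      exact h (fun x hx => by simpa using hall x (List.mem_reverse.mpr hx))
    simp [h, hne]

lemma pvRun_allSlash (t : List Char) (h : ∀ x ∈ t, x = '/') :
    pvRun true t = [] ∧ pvRun false t = (if t = [] then [] else ['/']) := by
  induction t with
  | nil => simp [pvRun]
  | cons c r ih =>
    have hc : c = '/' := h c (by simp)
    have ih' := ih (fun x hx => h x (by simp [hx]))
    rcases r with _ | ⟨y, r⟩
    · simp [pvRun, hc]
    · have hy : y = '/' := h y (by simp)
      simp [pvRun, hc, hy] at ih' ⊢
      exact ih'

lemma pvFix_cons_cons (x y : Char) (l : List Char) :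
    pvFix (x :: y :: l) = x :: pvFix (y :: l) := by
  unfold pvFix
  rw [List.getLast?_cons_cons]
  split <;> simp

lemma pvFix_cons_ne_nil (d : Char) (hd : d ≠ '/') (l : List Char) : pvFix (d :: l) ≠ [] := by
  unfold pvFix
  split
  · rename_i hlast
    rcases l with _ | ⟨y, r⟩
    · simp at hlast; exact absurd hlast hd
    · simp
  · simp

lemma pvACollapse_cons_cons (a b : Char) (r : List Char) :
    pvACollapse (a :: b :: r) = (if a = '/' ∧ b = '/' then [] else [a]) ++ pvACollapse (b :: r) := rfl

lemma pvRstrip_cons_ne (c : Char) (hc : c ≠ '/') (t : List Char) :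
    ∃ X, pvRstrip (c :: t) = c :: X := by
  rw [pvRstrip_cons]
  split
  · exact ⟨[], by simp⟩
  · exact ⟨_, rfl⟩

/-- Main A-side ↔ machine correspondence. -/
lemma pvMain (t : List Char) :
    (∀ d, d ≠ '/' → pvACollapse (pvRstrip (d :: t)) = pvFix (d :: pvRun false t)) ∧
    ((¬ ∀ x ∈ t, x = '/') → pvACollapse ('/' :: pvRstrip t) = pvFix ('/' :: pvRun true t)) := by
  induction t with
  | nil =>
    refine ⟨?_, by simp⟩
    intro d hd
    rw [pvRstrip_cons]
    simp [pvRun, pvACollapse, pvFix, hd]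
  | cons c t₂ ih =>
    obtain ⟨ih0, ih1⟩ := ih
    constructor
    · intro d hd
      rw [pvRstrip_cons]
      by_cases hall : ∀ x ∈ (c :: t₂), x = '/'
      · rw [if_pos hall, if_neg hd]
        have hc : c = '/' := hall c (by simp)
        have h2 := pvRun_allSlash t₂ (fun x hx => hall x (by simp [hx]))
        simp [pvACollapse, pvRun, hc, h2.1, pvFix]
      · rw [if_neg hall]
        by_cases hc : c = '/'
        · have ht₂ : ¬ ∀ x ∈ t₂, x = '/' := by
            intro hh
            exact hall (by
              intro x hx
              rcases List.mem_cons.mp hx with h | h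
              · exact h.trans hc
              · exact hh x h)
          rw [pvRstrip_cons, if_neg ht₂]
          subst hc
          rw [pvACollapse_cons_cons, if_neg (by simp [hd])]
          rw [List.singleton_append, ih1 ht₂]
          simp [pvRun, pvFix_cons_cons]
        · obtain ⟨X, hX⟩ := pvRstrip_cons_ne c hc t₂
          rw [hX, pvACollapse_cons_cons, if_neg (by simp [hc]), List.singleton_append, ← hX,
            ih0 c hc]
          simp [pvRun, hc, pvFix_cons_cons]
    · intro hex
      by_cases hc : c = '/'
      · have ht₂ : ¬ ∀ x ∈ t₂, x = '/' := by
          intro hh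
          exact hex (by
            intro x hx
            rcases List.mem_cons.mp hx with h | h
            · exact h.trans hc
            · exact hh x h)
        rw [pvRstrip_cons, if_neg ht₂]
        subst hc
        rw [pvACollapse_cons_cons, if_pos ⟨rfl, rfl⟩, List.nil_append, ih1 ht₂]
        simp [pvRun]
      · obtain ⟨X, hX⟩ := pvRstrip_cons_ne c hc t₂
        rw [hX, pvACollapse_cons_cons, if_neg (by simp [hc]), List.singleton_append, ← hX,
          ih0 c hc]
        simp [pvRun, hc, pvFix_cons_cons]

/-- B's fold against the machine, generalized over the accumulator. -/
lemma pvFoldRun (t : List Char) :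
    (∀ acc : List Char, acc ≠ [] → acc.getLast? ≠ some '/' →
        t.foldl pvBStep acc = acc ++ pvRun false t) ∧
    (∀ acc : List Char, acc.getLast? = some '/' →
        t.foldl pvBStep acc = acc ++ pvRun true t) := by
  induction t with
  | nil => exact ⟨fun acc _ _ => by simp [pvRun], fun acc _ => by simp [pvRun]⟩
  | cons c r ih =>
    constructor
    · intro acc hne hlast
      by_cases hc : c = '/'
      · have hstep : pvBStep acc c = acc ++ ['/'] := by
          simp [pvBStep, hc, hne, hlast]
        rw [List.foldl_cons, hstep, ih.2 (acc ++ ['/']) (by simp)]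
        simp [pvRun, hc]
      · have hstep : pvBStep acc c = acc ++ [c] := by simp [pvBStep, hc]
        rw [List.foldl_cons, hstep, ih.1 (acc ++ [c]) (by simp) (by simp [hc])]
        simp [pvRun, hc]
    · intro acc hlast
      by_cases hc : c = '/'
      · have hstep : pvBStep acc c = acc := by
          simp [pvBStep, hc, hlast]
        rw [List.foldl_cons, hstep, ih.2 acc hlast]
        simp [pvRun, hc]
      · have hstep : pvBStep acc c = acc ++ [c] := by simp [pvBStep, hc]
        rw [List.foldl_cons, hstep, ih.1 (acc ++ [c]) (by simp) (by simp [hc])]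
        simp [pvRun, hc]

lemma pvFoldB_strip (cs : List Char) :
    cs.foldl pvBStep [] =
      (match pvAStripLeft cs with
       | none => []
       | some [] => []
       | some (d :: t) => d :: pvRun false t) := by
  induction cs with
  | nil => rfl
  | cons c r ih =>
    by_cases hc : c = '/'
    · have hstep : pvBStep [] c = [] := by simp [pvBStep, hc]
      rw [List.foldl_cons, hstep, ih]
      simp [pvAStripLeft, hc]
    · have hstep : pvBStep [] c = [c] := by simp [pvBStep, hc]
      rw [List.foldl_cons, hstep,
        (pvFoldRun r).1 [c] (by simp) (by simp [hc])]
      simp [pvAStripLeft, hc]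

lemma pvAStripLeft_some_shape (cs ds : List Char) (h : pvAStripLeft cs = some ds) :
    ∃ d t, ds = d :: t ∧ d ≠ '/' := by
  induction cs with
  | nil => simp [pvAStripLeft] at h
  | cons c r ih =>
    by_cases hc : c = '/'
    · exact ih (by simpa [pvAStripLeft, hc] using h)
    · simp [pvAStripLeft, hc] at h
      exact ⟨c, r, h.symm, hc⟩


-- ===== VERDICT (by name: the statement is the Claim_ definition above) =====
theorem fixAdjacentRepeatedWordBreaks_spec : Claim_equal_fixAdjacentRepeatedWordBreaks := by
  intro text _ _
  unfold Spec_fixAdjacentRepeatedWordBreaks fixAdjacentRepeatedWordBreaks fixAdjacentRepeatedWordBreaks_alt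
  rw [pvFoldB_strip]
  cases hsl : pvAStripLeft text.toList with
  | none => simp
  | some ds =>
    obtain ⟨d, t, rfl, hd⟩ := pvAStripLeft_some_shape _ _ hsl
    obtain ⟨X, hX⟩ := pvRstrip_cons_ne d hd t
    have hmain := (pvMain t).1 d hd
    simp only []
    rw [show (pvAStripRightRev (d :: t).reverse).reverse = pvRstrip (d :: t) from rfl, hX]
    have h2 : pvACollapse (d :: X) = pvFix (d :: pvRun false t) := by rw [← hX]; exact hmain
    change some (String.ofList (pvACollapse (d :: X))) = _
    rw [h2]
    have h3 : pvFix (d :: pvRun false t) ≠ [] := pvFix_cons_ne_nil d hd _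
    simp only [pvFix] at h3 ⊢
    split <;> simp_all
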